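-- pv_equiv track=rewrite | github.com/dabdul-wahab1988/HBMPRA | sensitivity_analysis.py | resolve_key_in_dict
-- ===== SOURCE A (Python) =====
-- from typing import Dict, List, Tuple, Optional, Any, Union
--
-- def resolve_key_in_dict(key: str, d: Dict) -> Optional[str]:
--     """Resolve key in dictionary with fallback matching."""
--     if key in d:
--         return key
--     base = "".join([ch for ch in str(key) if ch.isalnum()]).lower()
--     for k in d.keys():
--         if "".join([ch for ch in str(k) if ch.isalnum()]).lower() == base:
--             return k
--     return None
-- ===== SOURCE B (Python) =====
-- def _alnum_eq(s, t):
--     """Two-pointer streaming comparison: do s and t have the same sequence of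
--     alphanumeric characters, case-insensitively?  Never builds normalized strings."""
--     i, j, n, m = 0, 0, len(s), len(t)
--     while True:
--         while i < n and not s[i].isalnum():
--             i += 1
--         while j < m and not t[j].isalnum():
--             j += 1
--         if i == n or j == m:
--             return i == n and j == m
--         if s[i].lower() != t[j].lower():
--             return False
--         i += 1
--         j += 1
--
-- def resolve_key_in_dict(key, d):
--     """Resolve key in dictionary with fallback matching."""
--     if key in d:
--         return key
--     return next((k for k in d if _alnum_eq(str(k), str(key))), None)
-- ===== Notes on version B (the rewrite author's own statement) =====
-- stated objective: alternative
-- what changed: Instead of materializing a normalized (filter-alnum, lowercased) string for the key and for every dict key and comparing those strings, B runs a two-pointer skip-and-compare directly over the raw characters of each candidate pair, case-folding on the fly and bailing out at the first mismatching alphanumeric character; no intermediate strings are built.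
import Mathlib
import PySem

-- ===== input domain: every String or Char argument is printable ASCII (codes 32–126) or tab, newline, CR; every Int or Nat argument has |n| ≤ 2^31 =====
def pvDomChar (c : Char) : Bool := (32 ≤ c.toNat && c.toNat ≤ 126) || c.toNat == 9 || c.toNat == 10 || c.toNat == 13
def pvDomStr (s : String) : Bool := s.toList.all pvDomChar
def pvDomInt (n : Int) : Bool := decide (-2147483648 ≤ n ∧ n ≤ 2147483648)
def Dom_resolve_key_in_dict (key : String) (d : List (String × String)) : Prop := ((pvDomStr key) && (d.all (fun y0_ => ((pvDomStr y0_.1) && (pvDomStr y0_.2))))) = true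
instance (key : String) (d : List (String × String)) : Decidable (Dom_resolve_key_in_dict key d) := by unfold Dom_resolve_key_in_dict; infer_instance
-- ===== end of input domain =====

-- B replaces A's materialize-normalized-string-then-compare per key by a two-pointer
-- skip-and-compare over the raw characters (alternative; same asymptotic cost).

-- ===== PORT A =====
-- "".join([ch for ch in str(s) if ch.isalnum()]).lower()
def pvNorm (s : String) : String := PySem.Str.lower (String.ofList (s.toList.filter PySem.Chars.isalnum))

-- the 'for k in d.keys(): if "".join(...).lower() == base: return k' loop
def pvAScan (base : String) : List (String × String) → Option String
  | [] => none
  | (k, _) :: rest => if pvNorm k == base then some k else pvAScan base rest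

def resolve_key_in_dict (key : String) (d : List (String × String)) : Option String :=
  if d.any (fun kv => kv.1 == key) then some key
  else pvAScan (pvNorm key) d

-- ===== PORT B =====
-- the inner 'while i < n and not s[i].isalnum(): i += 1' pointer advance
def pvSkip : List Char → List Char
  | [] => []
  | c :: t => if PySem.Chars.isalnum c then c :: t else pvSkip t

-- _alnum_eq: two-pointer skip-and-compare, case-folding on the fly
def pvAlnumEq : List Char → List Char → Bool
  | [], t => (pvSkip t).isEmpty
  | c :: s, t =>
    if PySem.Chars.isalnum c then
      match pvSkip t with
      | [] => false
      | c' :: t' => (PySem.Chars.lowerChar c == PySem.Chars.lowerChar c') && pvAlnumEq s t'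
    else pvAlnumEq s t

-- 'next((k for k in d if _alnum_eq(str(k), str(key))), None)'
def pvBScan (key : String) : List (String × String) → Option String
  | [] => none
  | (k, _) :: rest => if pvAlnumEq k.toList key.toList then some k else pvBScan key rest

def resolve_key_in_dict_alt (key : String) (d : List (String × String)) : Option String :=
  if d.any (fun kv => kv.1 == key) then some key
  else pvBScan key d

-- ===== PRECONDITION & SPEC =====
def Spec_resolve_key_in_dict (key : String) (d : List (String × String)) (out : Option String) : Prop := out = resolve_key_in_dict_alt key d
instance (key : String) (d : List (String × String)) (out : Option String) : Decidable (Spec_resolve_key_in_dict key d out) := by unfold Spec_resolve_key_in_dict; infer_instance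

-- ===== CLAIM (what is proved, stated in full; the proofs are below) =====
def Claim_equal_resolve_key_in_dict : Prop := ∀ (key : String) (d : List (String × String)), Dom_resolve_key_in_dict key d → Spec_resolve_key_in_dict key d (resolve_key_in_dict key d)

-- ===== LEMMAS AND PROOFS =====

-- the normalized character sequence, list-side
def pvNormL (s : List Char) : List Char := (s.filter PySem.Chars.isalnum).map PySem.Chars.lowerChar

theorem pvSkip_filter (t : List Char) :
    t.filter PySem.Chars.isalnum = (pvSkip t).filter PySem.Chars.isalnum := by
  induction t with
  | nil => rfl
  | cons c t ih =>
    by_cases h : PySem.Chars.isalnum c = true <;> simp [pvSkip, h, ih]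

theorem pvSkip_head (t : List Char) :
    ∀ c' t', pvSkip t = c' :: t' → PySem.Chars.isalnum c' = true := by
  induction t with
  | nil => intro c' t' h; simp [pvSkip] at h
  | cons c t ih =>
    intro c' t' h
    by_cases hc : PySem.Chars.isalnum c = true
    · simp [pvSkip, hc] at h; rw [← h.1]; exact hc
    · simp [pvSkip, hc] at h; exact ih _ _ h

-- the two-pointer comparison decides equality of the normalized sequences
theorem pvAlnumEq_iff (s t : List Char) :
    pvAlnumEq s t = true ↔ pvNormL s = pvNormL t := by
  induction s generalizing t with
  | nil =>
    simp only [pvAlnumEq, pvNormL, List.filter_nil, List.map_nil]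
    rw [pvSkip_filter t]
    cases h : pvSkip t with
    | nil => simp
    | cons c' t' =>
      have hc' := pvSkip_head t _ _ h
      simp [hc']
  | cons c s ih =>
    by_cases hc : PySem.Chars.isalnum c = true
    · simp only [pvAlnumEq, hc, if_pos]
      have hfil : pvNormL (c :: s) = PySem.Chars.lowerChar c :: pvNormL s := by
        simp [pvNormL, hc]
      rw [hfil]
      have htf : pvNormL t = pvNormL (pvSkip t) := by
        simp [pvNormL]; rw [pvSkip_filter t]
      rw [htf]
      cases h : pvSkip t with
      | nil => simp [pvNormL]
      | cons c' t' =>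
        have hc' := pvSkip_head t _ _ h
        simp [pvNormL, hc', Bool.and_eq_true, beq_iff_eq, ih t']
    · have hfil : pvNormL (c :: s) = pvNormL s := by
        simp [pvNormL, hc]
      simp [pvAlnumEq, hc, hfil, ih t]

-- pvNorm equality, string-side, is pvNormL equality
theorem pvNorm_toList (a : String) : (pvNorm a).toList = pvNormL a.toList := by
  rw [pvNorm, PySem.Str.toList_lower]
  simp [pvNormL, PySem.Chars.lower, String.toList_ofList]

theorem pvNorm_eq_iff (a b : String) :
    (pvNorm a == pvNorm b) = true ↔ pvNormL a.toList = pvNormL b.toList := by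
  rw [beq_iff_eq, ← String.toList_inj, pvNorm_toList, pvNorm_toList]

theorem pvScan_eq (key : String) (d : List (String × String)) :
    pvAScan (pvNorm key) d = pvBScan key d := by
  induction d with
  | nil => rfl
  | cons kv rest ih =>
    obtain ⟨k, v⟩ := kv
    simp only [pvAScan, pvBScan, ih]
    by_cases h : pvAlnumEq k.toList key.toList = true
    · rw [if_pos h, if_pos (pvNorm_eq_iff k key |>.2 ((pvAlnumEq_iff _ _).1 h))]
    · rw [if_neg h, if_neg]
      intro hn
      exact h ((pvAlnumEq_iff _ _).2 ((pvNorm_eq_iff k key).1 hn))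

-- ===== VERDICT (by name: the statement is the Claim_ definition above) =====
theorem resolve_key_in_dict_spec : Claim_equal_resolve_key_in_dict := by
  intro key d _
  unfold Spec_resolve_key_in_dict resolve_key_in_dict resolve_key_in_dict_alt
  split
  · rfl
  · exact pvScan_eq key d
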